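-- pv_equiv track=rewrite | github.com/andy1li/codejam | Kickstart/2019/Practice/B. Mural/2019k-p-b.py | solve
-- ===== SOURCE A (Python) =====
-- from math import ceil
--
-- def solve(n, scores) -> int:
--     l = ceil(n/2)
--     ans = window = sum(scores[:l])
--
--     for i in range(l, n):
--         window += scores[i]
--         window -= scores[i-l]
--         ans = max(ans, window)
--
--     return ans
-- ===== SOURCE B (Python) =====
-- def solve(n, scores):
--     l = (n + 1) // 2
--     prefix = [0]
--     for x in scores[:n]:
--         prefix.append(prefix[-1] + x)
--     return max((prefix[i + l] - prefix[i] for i in range(n - l + 1)), default=0)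
-- ===== Notes on version B (the rewrite author's own statement) =====
-- stated objective: alternative
-- what changed: Replaces A's running sliding-window updates (add entering element, subtract leaving element, running max) by building a prefix-sum array once and taking the max of P[i+l]-P[i] over all window starts.
-- outside the precondition, e.g. on solve(-2, [1, 2, 3]): A returns 3, B returns 0; on solve(1, []): A returns 0, B raises IndexError
import Mathlib
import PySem

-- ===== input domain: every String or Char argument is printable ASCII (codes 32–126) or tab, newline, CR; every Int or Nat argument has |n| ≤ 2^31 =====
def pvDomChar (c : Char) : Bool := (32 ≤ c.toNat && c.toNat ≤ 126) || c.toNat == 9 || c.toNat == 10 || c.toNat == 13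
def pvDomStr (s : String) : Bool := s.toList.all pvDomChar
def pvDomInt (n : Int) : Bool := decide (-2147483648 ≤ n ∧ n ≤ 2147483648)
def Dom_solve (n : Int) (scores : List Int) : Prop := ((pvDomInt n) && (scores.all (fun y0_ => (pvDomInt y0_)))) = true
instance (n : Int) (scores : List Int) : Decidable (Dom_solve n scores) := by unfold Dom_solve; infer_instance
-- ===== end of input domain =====

-- B replaces A's running sliding-window update by a prefix-sum array and a max over window sums (alternative decomposition, same cost).

-- ===== PORT A =====
-- ceil(n/2) is ported exactly as the ceiling division -((-n) // 2)
def solve (n : Int) (scores : List Int) : Int :=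
  let l := -(PySem.Int.floordiv (-n) 2)
  let init := (PySem.List.slice scores none (some l)).sum
  let res := (PySem.List.pyRange l n 1).foldl
    (fun (st : Int × Int) i =>
      let w := st.2 + PySem.List.pyGetD scores i 0 - PySem.List.pyGetD scores (i - l) 0
      (max st.1 w, w))
    (init, init)
  res.1

-- ===== PORT B =====
def solve_alt (n : Int) (scores : List Int) : Int :=
  let l := PySem.Int.floordiv (n + 1) 2
  let pfx := (PySem.List.slice scores none (some n)).foldl
    (fun acc x => acc ++ [PySem.List.pyGetD acc (-1) 0 + x]) [0]
  let cands := (PySem.List.pyRange 0 (n - l + 1) 1).map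
    (fun i => PySem.List.pyGetD pfx (i + l) 0 - PySem.List.pyGetD pfx i 0)
  (PySem.List.max? cands (fun x => x)).getD 0

-- ===== PRECONDITION & SPEC =====
-- Pre_ excludes negative n (A then sums an accidental negative-length slice while B's window count is empty)
-- and n > len(scores) (A raises IndexError in the loop, or — when the loop is empty — B itself raises on the prefix lookup).
def Pre_solve (n : Int) (scores : List Int) : Prop := 0 ≤ n ∧ n ≤ scores.length
instance (n : Int) (scores : List Int) : Decidable (Pre_solve n scores) := by unfold Pre_solve; infer_instance
def pvWitness_solve : Int × List Int := (3, [1, 2, 3])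

def Spec_solve (n : Int) (scores : List Int) (out : Int) : Prop := out = solve_alt n scores
instance (n : Int) (scores : List Int) (out : Int) : Decidable (Spec_solve n scores out) := by unfold Spec_solve; infer_instance

-- ===== CLAIM (what is proved, stated in full; the proofs are below) =====
def Claim_equal_solve : Prop := ∀ (n : Int) (scores : List Int), Dom_solve n scores → Pre_solve n scores → Spec_solve n scores (solve n scores)

-- ===== LEMMAS AND PROOFS =====

-- window sum of width k starting at t, as a difference of prefix sums
def Wfun (xs : List Int) (k t : Nat) : Int := (xs.take (t + k)).sum - (xs.take t).sum

lemma sum_take_succ_getD (xs : List Int) (i : Nat) (h : i < xs.length) :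
    (xs.take (i + 1)).sum = (xs.take i).sum + xs.getD i 0 := by
  rw [List.sum_take_succ xs i h, List.getD_eq_getElem xs 0 h]

lemma Wfun_step (xs : List Int) (k t : Nat) (h : t + k < xs.length) :
    Wfun xs k (t + 1) = Wfun xs k t + xs.getD (t + k) 0 - xs.getD t 0 := by
  unfold Wfun
  rw [show t + 1 + k = (t + k) + 1 by omega,
      sum_take_succ_getD xs (t + k) h,
      sum_take_succ_getD xs t (by omega)]
  ring

lemma build_prefix (ys : List Int) : ∀ (pre : List Int) (s : Int),
    List.foldl (fun acc x => acc ++ [PySem.List.pyGetD acc (-1) 0 + x]) (pre ++ [s]) ys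
      = pre ++ (List.range (ys.length + 1)).map (fun i => s + (ys.take i).sum) := by
  induction ys with
  | nil => intro pre s; simp
  | cons y ys ih =>
      intro pre s
      simp only [List.foldl_cons, PySem.List.pyGetD_neg_one_append_singleton]
      rw [ih (pre ++ [s]) (s + y), List.append_assoc]
      congr 1
      conv_rhs => rw [List.length_cons, List.range_succ_eq_map]
      simp [List.map_map, Function.comp_def, List.take_succ_cons, add_assoc]

lemma Aloop (xs : List Int) (k m : Nat) (hm : m ≤ xs.length) :
    ∀ (N j : Nat) (a : Int), j + k + N ≤ m →
    (List.range' j N).foldl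
      (fun (st : Int × Int) t =>
        (max st.1 (st.2 + PySem.List.pyGetD xs ((k + t : Nat) : Int) 0
                        - PySem.List.pyGetD xs (((k + t : Nat) : Int) - (k : Int)) 0),
         st.2 + PySem.List.pyGetD xs ((k + t : Nat) : Int) 0
              - PySem.List.pyGetD xs (((k + t : Nat) : Int) - (k : Int)) 0))
      (a, Wfun xs k j)
    = ((List.range' j N).foldl (fun acc t => max acc (Wfun xs k (t + 1))) a, Wfun xs k (j + N)) := by
  intro N
  induction N with
  | zero => intro j a _; simp
  | succ N ih =>
      intro j a h
      rw [List.range'_succ]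
      simp only [List.foldl_cons]
      have e2 : ((k + j : Nat) : Int) - (k : Int) = ((j : Nat) : Int) := by push_cast; ring
      have hhead : Wfun xs k j + PySem.List.pyGetD xs ((k + j : Nat) : Int) 0
                              - PySem.List.pyGetD xs (((k + j : Nat) : Int) - (k : Int)) 0
          = Wfun xs k (j + 1) := by
        rw [e2]
        simp only [PySem.List.pyGetD_natCast]
        rw [Nat.add_comm k j, Wfun_step xs k j (by omega)]
      rw [hhead]
      rw [ih (j + 1) (max a (Wfun xs k (j + 1))) (by omega),
          show j + (N + 1) = j + 1 + N by omega]

-- ===== VERDICT (by name: the statement is the Claim_ definition above) =====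
theorem solve_spec : Claim_equal_solve := by
  intro n scores _ hpre
  obtain ⟨hn, hlen⟩ := hpre
  unfold Spec_solve solve solve_alt
  dsimp only
  -- name the sizes
  obtain ⟨m, rfl⟩ : ∃ m : Nat, n = (m : Int) := ⟨n.toNat, (Int.toNat_of_nonneg hn).symm⟩
  have hmlen : m ≤ scores.length := by exact_mod_cast hlen
  -- both l's are ((m+1)/2 : Nat)
  have hkm : (m + 1) / 2 ≤ m := by omega
  set k : Nat := (m + 1) / 2 with hk
  have hlA : -(PySem.Int.floordiv (-(m : Int)) 2) = (k : Int) := by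
    rw [PySem.Int.floordiv_eq_ediv_of_pos (by norm_num)]; omega
  have hlB : PySem.Int.floordiv ((m : Int) + 1) 2 = (k : Int) := by
    rw [PySem.Int.floordiv_eq_ediv_of_pos (by norm_num)]; omega
  rw [hlA, hlB]
  -- both slices are takes
  rw [PySem.List.slice_to_natCast, PySem.List.slice_to_natCast]
  have hpfx := build_prefix (scores.take m) [] 0
  simp only [List.nil_append] at hpfx
  rw [hpfx]
  have hlen_take : (scores.take m).length = m := List.length_take_of_le hmlen
  rw [hlen_take]
  -- B's candidate list
  have hrng : PySem.List.pyRange 0 ((m : Int) - (k : Int) + 1) 1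
      = (List.range (m - k + 1)).map (fun t : Nat => (t : Int)) := by
    have h1 : ((m : Int) - (k : Int) + 1 - 0).toNat = m - k + 1 := by omega
    rw [PySem.List.pyRange_one, h1]
    simp
  rw [hrng, List.map_map]
  -- evaluate each candidate: prefix lookups become window sums
  have hcand : ∀ t ∈ List.range (m - k + 1),
      ((fun i => PySem.List.pyGetD ((List.range (m + 1)).map (fun i => 0 + ((scores.take m).take i).sum)) (i + (k : Int)) 0
               - PySem.List.pyGetD ((List.range (m + 1)).map (fun i => 0 + ((scores.take m).take i).sum)) i 0) ∘ (fun t : Nat => (t : Int))) t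
      = Wfun scores k t := by
    intro t ht
    rw [List.mem_range] at ht
    have h1 : t + k < m + 1 := by omega
    have h2 : t < m + 1 := by omega
    simp only [Function.comp]
    have e1 : ((t : Nat) : Int) + (k : Int) = ((t + k : Nat) : Int) := by push_cast; ring
    rw [e1, PySem.List.pyGetD_natCast, PySem.List.pyGetD_natCast]
    rw [List.getD_eq_getElem _ 0 (by simpa using h1), List.getD_eq_getElem _ 0 (by simpa using h2)]
    simp only [List.getElem_map, List.getElem_range, List.take_take, zero_add]
    unfold Wfun
    rw [Nat.min_eq_left (by omega), Nat.min_eq_left (by omega)]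
  rw [List.map_congr_left hcand]
  -- peel off the first candidate: max with default 0 is a foldl max over the rest
  rw [List.range_succ_eq_map, List.map_cons, PySem.List.max?_id_cons]
  simp only [Option.getD_some, List.map_map]
  -- A's side: initial window is W 0
  have hW0 : (scores.take k).sum = Wfun scores k 0 := by unfold Wfun; simp
  rw [hW0]
  -- A's loop over pyRange k m 1
  have hrngA : PySem.List.pyRange ((k : Nat) : Int) ((m : Nat) : Int) 1
      = (List.range' 0 (m - k)).map (fun t : Nat => ((k + t : Nat) : Int)) := by
    have h1 : (((m : Nat) : Int) - ((k : Nat) : Int)).toNat = m - k := by omega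
    rw [PySem.List.pyRange_one, h1, List.range_eq_range']
    exact List.map_congr_left (fun t _ => by omega)
  rw [hrngA, List.foldl_map]
  have hloop := Aloop scores k m hmlen (m - k) 0 (Wfun scores k 0) (by omega)
  simp only [Nat.zero_add] at hloop
  rw [hloop]
  rw [List.range_eq_range', List.foldl_map]
  simp [Nat.succ_eq_add_one]
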